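-- pv_equiv track=rewrite | github.com/Afriat0/oscillateur-dans-le-jeu-de-la-vie | code_final.py | liste_pour_diviser_m_par_une_puissance_de_2
-- ===== SOURCE A (Python) =====
-- def liste_pour_diviser_m_par_une_puissance_de_2(m,y):
--     lemax=(y-100)//(17)
--     lemax=lemax+lemax%2-1
--     if lemax<=1 or m<4:
--         l=[]
--         for i in range(m):
--             if i%2==0:
--                 l.append(("semisnarkrenverseactif",0))
--             else:
--                 l.append(("semisnarkactif",0))
--         return l,min(1,lemax)
--     l=[("semisnarkrenverseactif",15),("semisnarkrenverseactif",0)]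
--     verite=False
--     compteur=2
--     d=0
--     for i in range(m-3):
--         verite=not verite
--         if compteur<lemax:
--             if verite:
--                 l.append(("semisnarkactif",d))
--             else:
--                 l.append(("semisnarkrenverseactif",d))
--             compteur+=1
--             d=0
--         elif compteur==lemax:
--             compteur=1
--             if not verite:
--                 l.append(("semisnarkactif",35))
--             else:
--                 l.append(("semisnarkrenverseactif",35))
--             d=10
--     x=(m-1)%lemax
--     if x%2==0:
--         if not verite:
--             l.append(("semisnarkactif",0))
--         else:
--             l.append(("semisnarkrenverseactif",0))
--     else:
--         if verite:
--             l.append(("semisnarkactif",0))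
--         else:
--             l.append(("semisnarkrenverseactif",0))
--     return l,lemax
-- ===== SOURCE B (Python) =====
-- def liste_pour_diviser_m_par_une_puissance_de_2(m, y):
--     lemax = (y - 100) // 17
--     lemax = lemax + lemax % 2 - 1
--     if lemax <= 1 or m < 4:
--         l = [("semisnarkrenverseactif", 0) if i % 2 == 0 else ("semisnarkactif", 0)
--              for i in range(m)]
--         return l, min(1, lemax)
--     l = [("semisnarkrenverseactif", 15), ("semisnarkrenverseactif", 0)]
--     # reset (35-entry) iterations are exactly those with (i+2) % lemax == 0;
--     # the iteration right after a reset carries d=10, i.e. (i+1) % lemax == 0.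
--     l += [(("semisnarkrenverseactif" if i % 2 == 0 else "semisnarkactif"), 35)
--           if (i + 2) % lemax == 0
--           else (("semisnarkactif" if i % 2 == 0 else "semisnarkrenverseactif"),
--                 10 if (i + 1) % lemax == 0 else 0)
--           for i in range(m - 3)]
--     verite = (m - 3) % 2 == 1
--     even = (m - 1) % lemax % 2 == 0
--     l.append((("semisnarkactif" if verite != even else "semisnarkrenverseactif"), 0))
--     return l, lemax
-- ===== Notes on version B (the rewrite author's own statement) =====
-- stated objective: simpler
-- what changed: A's main loop carries running state (verite toggle, compteur cycle counter, pending d) across iterations; B drops all state and builds the list with a stateless comprehension computing each entry directly from its index via modular arithmetic ((i+2) % lemax picks the 35-reset entries, (i+1) % lemax the d=10 entries, i's parity the name), with the tail entry computed in closed form.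
import Mathlib
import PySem

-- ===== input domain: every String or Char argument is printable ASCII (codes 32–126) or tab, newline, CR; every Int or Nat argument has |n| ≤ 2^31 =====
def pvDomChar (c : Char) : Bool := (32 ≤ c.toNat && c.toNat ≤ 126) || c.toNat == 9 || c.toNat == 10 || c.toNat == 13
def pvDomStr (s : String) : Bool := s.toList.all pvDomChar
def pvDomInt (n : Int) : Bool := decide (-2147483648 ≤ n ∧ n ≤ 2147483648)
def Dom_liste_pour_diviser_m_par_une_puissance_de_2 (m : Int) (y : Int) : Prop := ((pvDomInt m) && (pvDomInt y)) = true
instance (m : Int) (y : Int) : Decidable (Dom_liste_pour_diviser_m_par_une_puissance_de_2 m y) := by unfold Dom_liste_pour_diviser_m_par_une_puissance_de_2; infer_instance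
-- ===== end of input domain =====

-- B replaces A's stateful loop (verite/compteur/d running state) by a stateless
-- index-based comprehension computed from i by modular arithmetic (objective: simpler).

-- ===== PORT A =====
-- A's loop body (the state is (l, verite, compteur, d); the loop index is unused by A)
def pvStepA (lemax : Int) (st : List (String × Int) × Bool × Int × Int) :
    List (String × Int) × Bool × Int × Int :=
  let l := st.1
  let verite := !st.2.1
  let compteur := st.2.2.1
  let d := st.2.2.2
  if compteur < lemax then
    ((if verite then l ++ [("semisnarkactif", d)] else l ++ [("semisnarkrenverseactif", d)]),
     verite, compteur + 1, 0)
  else if compteur = lemax then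
    ((if !verite then l ++ [("semisnarkactif", (35:Int))] else l ++ [("semisnarkrenverseactif", (35:Int))]),
     verite, 1, 10)
  else (l, verite, compteur, d)

def liste_pour_diviser_m_par_une_puissance_de_2 (m : Int) (y : Int) : (List (String × Int)) × Int :=
  let lemax0 := PySem.Int.floordiv (y - 100) 17
  let lemax := lemax0 + PySem.Int.mod lemax0 2 - 1
  if lemax ≤ 1 ∨ m < 4 then
    ((PySem.List.pyRange 0 m 1).foldl (fun l i =>
        if PySem.Int.mod i 2 = 0 then l ++ [("semisnarkrenverseactif", (0:Int))]
        else l ++ [("semisnarkactif", (0:Int))]) [],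
     min 1 lemax)
  else
    let s := (PySem.List.pyRange 0 (m - 3) 1).foldl (fun st _ => pvStepA lemax st)
      ([("semisnarkrenverseactif", 15), ("semisnarkrenverseactif", 0)], false, 2, 0)
    let verite := s.2.1
    let x := PySem.Int.mod (m - 1) lemax
    if PySem.Int.mod x 2 = 0 then
      ((if !verite then s.1 ++ [("semisnarkactif", (0:Int))] else s.1 ++ [("semisnarkrenverseactif", (0:Int))]), lemax)
    else
      ((if verite then s.1 ++ [("semisnarkactif", (0:Int))] else s.1 ++ [("semisnarkrenverseactif", (0:Int))]), lemax)

-- ===== PORT B =====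
-- B's comprehension cell: the 35-entry sits exactly where (i+2) % lemax == 0,
-- the d=10 entry exactly where (i+1) % lemax == 0, names by the parity of i.
def pvSnarkCell (lemax : Int) (i : Int) : String × Int :=
  if PySem.Int.mod (i + 2) lemax = 0 then
    ((if PySem.Int.mod i 2 = 0 then "semisnarkrenverseactif" else "semisnarkactif"), 35)
  else
    ((if PySem.Int.mod i 2 = 0 then "semisnarkactif" else "semisnarkrenverseactif"),
     if PySem.Int.mod (i + 1) lemax = 0 then (10:Int) else 0)

def liste_pour_diviser_m_par_une_puissance_de_2_alt (m : Int) (y : Int) : (List (String × Int)) × Int :=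
  let lemax0 := PySem.Int.floordiv (y - 100) 17
  let lemax := lemax0 + PySem.Int.mod lemax0 2 - 1
  if lemax ≤ 1 ∨ m < 4 then
    ((PySem.List.pyRange 0 m 1).map (fun i =>
        if PySem.Int.mod i 2 = 0 then ("semisnarkrenverseactif", (0:Int))
        else ("semisnarkactif", (0:Int))),
     min 1 lemax)
  else
    let l := [("semisnarkrenverseactif", (15:Int)), ("semisnarkrenverseactif", (0:Int))]
      ++ (PySem.List.pyRange 0 (m - 3) 1).map (pvSnarkCell lemax)
    let verite : Bool := decide (PySem.Int.mod (m - 3) 2 = 1)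
    let even : Bool := decide (PySem.Int.mod (PySem.Int.mod (m - 1) lemax) 2 = 0)
    (l ++ [((if verite != even then "semisnarkactif" else "semisnarkrenverseactif"), (0:Int))], lemax)

-- ===== PRECONDITION & SPEC =====
def Spec_liste_pour_diviser_m_par_une_puissance_de_2 (m : Int) (y : Int) (out : (List (String × Int)) × Int) : Prop := out = liste_pour_diviser_m_par_une_puissance_de_2_alt m y
instance (m : Int) (y : Int) (out : (List (String × Int)) × Int) : Decidable (Spec_liste_pour_diviser_m_par_une_puissance_de_2 m y out) := by unfold Spec_liste_pour_diviser_m_par_une_puissance_de_2; infer_instance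

-- ===== CLAIM (what is proved, stated in full; the proofs are below) =====
def Claim_equal_liste_pour_diviser_m_par_une_puissance_de_2 : Prop := ∀ (m : Int) (y : Int), Dom_liste_pour_diviser_m_par_une_puissance_de_2 m y → Spec_liste_pour_diviser_m_par_une_puissance_de_2 m y (liste_pour_diviser_m_par_une_puissance_de_2 m y)

-- ===== LEMMAS AND PROOFS =====

-- A's guard-branch loop appends one element per index: it is the map B builds.
lemma pvGuardFold (xs : List Int) (acc : List (String × Int)) :
    xs.foldl (fun l i =>
        if PySem.Int.mod i 2 = 0 then l ++ [("semisnarkrenverseactif", (0:Int))]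
        else l ++ [("semisnarkactif", (0:Int))]) acc
    = acc ++ xs.map (fun i =>
        if PySem.Int.mod i 2 = 0 then ("semisnarkrenverseactif", (0:Int))
        else ("semisnarkactif", (0:Int))) := by
  have h : (fun (l : List (String × Int)) (i : Int) =>
        if PySem.Int.mod i 2 = 0 then l ++ [("semisnarkrenverseactif", (0:Int))]
        else l ++ [("semisnarkactif", (0:Int))])
      = fun l i => l ++ [if PySem.Int.mod i 2 = 0 then ("semisnarkrenverseactif", (0:Int))
        else ("semisnarkactif", (0:Int))] := by
    funext l i; split <;> rfl
  rw [h, PySem.List.foldl_append_singleton_eq_map]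

-- closed forms of A's running state after n iterations of the main loop
def pvC (lemax : Int) (n : Nat) : Int :=
  if ((n : Int) + 2) % lemax = 0 then lemax else ((n : Int) + 2) % lemax
def pvD (lemax : Int) (n : Nat) : Int :=
  if ((n : Int) + 1) % lemax = 0 then 10 else 0

lemma pvMod_succ (a lemax : Int) (h : 1 < lemax) :
    (a + 1) % lemax = (a % lemax + 1) % lemax := by
  conv_lhs => rw [Int.add_emod]
  rw [Int.emod_eq_of_lt (by omega) h]

-- the loop invariant: A's stateful fold equals B's stateless map, with
-- verite / compteur / d given by the closed forms above
lemma pvLoopInv (lemax : Int) (h3 : 3 ≤ lemax) (l0 : List (String × Int)) (n : Nat) :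
    (PySem.List.pyRange 0 (n : Int) 1).foldl (fun st _ => pvStepA lemax st) (l0, false, 2, 0)
    = (l0 ++ (PySem.List.pyRange 0 (n : Int) 1).map (pvSnarkCell lemax),
       decide (n % 2 = 1), pvC lemax n, pvD lemax n) := by
  induction n with
  | zero =>
      rw [PySem.List.pyRange_one_eq_nil (by simp)]
      simp only [List.foldl_nil, List.map_nil, List.append_nil, Nat.cast_zero, zero_add]
      unfold pvC pvD
      rw [Int.emod_eq_of_lt (by omega) (by omega), Int.emod_eq_of_lt (by omega) (by omega)]
      norm_num
  | succ n ih =>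
      have hcast : (((n + 1 : Nat)) : Int) = (n : Int) + 1 := by push_cast; ring
      rw [hcast, PySem.List.pyRange_one_succ_right (by positivity), List.foldl_append,
        List.map_append, ih]
      simp only [List.foldl_cons, List.foldl_nil, List.map_cons, List.map_nil]
      have hn2 : ((n : Int)) % 2 = ((n % 2 : Nat) : Int) := (Int.natCast_mod n 2).symm
      have hr0 : 0 ≤ ((n : Int) + 2) % lemax := Int.emod_nonneg _ (by omega)
      have hrlt : ((n : Int) + 2) % lemax < lemax := Int.emod_lt_of_pos _ (by omega)
      have hsucc3 : ((n : Int) + 3) % lemax = (((n : Int) + 2) % lemax + 1) % lemax := by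
        have := pvMod_succ ((n : Int) + 2) lemax (by omega)
        simpa [show (n : Int) + 2 + 1 = (n : Int) + 3 by ring] using this
      have hcast2 : ((n : Int) + 1) + 2 = (n : Int) + 3 := by ring
      have hcast3 : ((n : Int) + 1) + 1 = (n : Int) + 2 := by ring
      by_cases hr : ((n : Int) + 2) % lemax = 0
      · -- reset iteration: compteur = lemax, append the 35-entry, d becomes 10
        have hC : pvC lemax n = lemax := by unfold pvC; rw [if_pos hr]
        have hCnext : pvC lemax (n + 1) = 1 := by
          unfold pvC
          rw [hcast, hcast2, hsucc3, hr, show (0:Int) + 1 = 1 by norm_num,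
            Int.emod_eq_of_lt (by omega) (by omega), if_neg (by omega)]
        have hDnext : pvD lemax (n + 1) = 10 := by
          unfold pvD; rw [hcast, hcast3, if_pos hr]
        have hrd : lemax ∣ ((n : Int) + 2) := Int.dvd_of_emod_eq_zero hr
        rcases Nat.mod_two_eq_zero_or_one n with hp | hp <;>
          simp [pvStepA, pvSnarkCell, hC, hCnext, hDnext, hp, hn2, hr, hrd, hcast3,
            PySem.Int.mod_eq_emod_of_pos (show (0:Int) < lemax by omega),
            PySem.Int.mod_eq_emod_of_pos (show (0:Int) < 2 by omega),
            Nat.succ_mod_two_eq_one_iff, Nat.succ_mod_two_eq_zero_iff]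
      · -- ordinary iteration: compteur < lemax, append the parity entry with pending d
        have hC : pvC lemax n = ((n : Int) + 2) % lemax := by unfold pvC; rw [if_neg hr]
        have hlt : pvC lemax n < lemax := by rw [hC]; omega
        have hCnext : pvC lemax (n + 1) = ((n : Int) + 2) % lemax + 1 := by
          unfold pvC
          rw [hcast, hcast2, hsucc3]
          by_cases he : ((n : Int) + 2) % lemax + 1 = lemax
          · rw [he, Int.emod_self, if_pos rfl]
          · rw [Int.emod_eq_of_lt (by omega) (by omega), if_neg (by omega)]
        have hDnext : pvD lemax (n + 1) = 0 := by
          unfold pvD; rw [hcast, hcast3, if_neg hr]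
        have hrd : ¬ lemax ∣ ((n : Int) + 2) := by
          rw [Int.dvd_iff_emod_eq_zero]; exact hr
        rcases Nat.mod_two_eq_zero_or_one n with hp | hp <;>
          simp [pvStepA, pvSnarkCell, pvD, hC, hCnext, hDnext, hlt, hp, hn2, hr, hrd, hcast3,
            PySem.Int.mod_eq_emod_of_pos (show (0:Int) < lemax by omega),
            PySem.Int.mod_eq_emod_of_pos (show (0:Int) < 2 by omega),
            Nat.succ_mod_two_eq_one_iff, Nat.succ_mod_two_eq_zero_iff, hrlt]

-- ===== VERDICT (by name: the statement is the Claim_ definition above) =====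
theorem liste_pour_diviser_m_par_une_puissance_de_2_spec : Claim_equal_liste_pour_diviser_m_par_une_puissance_de_2 := by
  intro m y _
  unfold Spec_liste_pour_diviser_m_par_une_puissance_de_2
  simp only [liste_pour_diviser_m_par_une_puissance_de_2,
    liste_pour_diviser_m_par_une_puissance_de_2_alt]
  by_cases hg : PySem.Int.floordiv (y - 100) 17
      + PySem.Int.mod (PySem.Int.floordiv (y - 100) 17) 2 - 1 ≤ 1 ∨ m < 4
  · rw [if_pos hg, if_pos hg, pvGuardFold, List.nil_append]
  · rw [if_neg hg, if_neg hg]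
    push_neg at hg
    obtain ⟨hg1, hg2⟩ := hg
    set lemax0 := PySem.Int.floordiv (y - 100) 17 with hl0
    set lemax := lemax0 + PySem.Int.mod lemax0 2 - 1 with hl
    have hm2 : PySem.Int.mod lemax0 2 = lemax0 % 2 :=
      PySem.Int.mod_eq_emod_of_pos (by omega)
    have h3 : 3 ≤ lemax := by rw [hl, hm2] at hg1 ⊢; omega
    obtain ⟨n, hn⟩ : ∃ n : Nat, (n : Int) = m - 3 := ⟨(m - 3).toNat, by omega⟩
    rw [← hn, pvLoopInv lemax h3 _ n]
    have hv : PySem.Int.mod ((n : Int)) 2 = ((n % 2 : Nat) : Int) := by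
      rw [PySem.Int.mod_eq_emod_of_pos (by omega)]
      exact (Int.natCast_mod n 2).symm
    have hv2 : ((n : Int)) % 2 = ((n % 2 : Nat) : Int) := (Int.natCast_mod n 2).symm
    rcases Nat.mod_two_eq_zero_or_one n with hp | hp <;>
      by_cases he : (2 : Int) ∣ PySem.Int.mod (m - 1) lemax <;>
        simp [hv, hv2, hp, he]
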